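-- pv_equiv track=rewrite | github.com/nathanrobertbaldwin/leetcode | Fun Practice/12-19-2023-matrix-inversions.py | inversionCounter
-- ===== SOURCE A (Python) =====
-- def inversionCounter(matrix):
--     inversions = 0
--
--     for row in range(len(matrix)):
--         for col in range(len(matrix)):
--             currVal = matrix[row][col]
--             for i in range(row, len(matrix)):
--                 for j in range(col, len(matrix)):
--                     if currVal > matrix[i][j]:
--                         inversions += 1
--
--     return inversions
-- ===== SOURCE B (Python) =====
-- def _bisect_right(s, x):
--     # rightmost insertion point in the sorted list s (hand-written: A imports nothing)
--     lo = 0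
--     hi = len(s)
--     while lo < hi:
--         mid = (lo + hi) // 2
--         if x < s[mid]:
--             hi = mid
--         else:
--             lo = mid + 1
--     return lo
--
--
-- def inversionCounter(matrix):
--     # For each ordered pair of rows (r, i) with r <= i, sweep the columns once,
--     # keeping a sorted list of the values matrix[r][0..j]; the number of them
--     # strictly greater than matrix[i][j] is found by binary search.
--     n = len(matrix)
--     total = 0
--     for r in range(n):
--         rowa = matrix[r]
--         for i in range(r, n):
--             rowb = matrix[i]
--             s = []
--             for j in range(n):
--                 v = rowa[j]
--                 s.insert(_bisect_right(s, v), v)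
--                 total += len(s) - _bisect_right(s, rowb[j])
--     return total
-- ===== Notes on version B (the rewrite author's own statement) =====
-- stated objective: faster
-- what changed: Replaces the per-cell rescan of the whole lower-right submatrix (four nested range loops) by a sweep over ordered row pairs that maintains a sorted list of the upper row's prefix values and counts dominated values by binary search.
import Mathlib
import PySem

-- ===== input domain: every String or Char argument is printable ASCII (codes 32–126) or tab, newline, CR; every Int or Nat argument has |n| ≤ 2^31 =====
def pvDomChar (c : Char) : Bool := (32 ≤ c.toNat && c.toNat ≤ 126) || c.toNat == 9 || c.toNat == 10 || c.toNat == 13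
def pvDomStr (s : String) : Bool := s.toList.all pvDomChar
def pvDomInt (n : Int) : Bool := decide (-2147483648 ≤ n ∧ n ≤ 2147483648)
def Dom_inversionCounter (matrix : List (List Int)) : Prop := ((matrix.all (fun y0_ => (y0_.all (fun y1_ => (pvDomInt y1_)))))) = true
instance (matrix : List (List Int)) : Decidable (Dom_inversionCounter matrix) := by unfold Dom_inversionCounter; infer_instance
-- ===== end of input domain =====

-- B replaces A's per-cell rescan of the whole lower-right submatrix by a sweep over ordered
-- row pairs that keeps a sorted list of the upper row's prefix values and counts by binary search.

-- ===== PORT A =====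
def inversionCounter (matrix : List (List Int)) : Int :=
  let n : Int := (matrix.length : Int)
  (PySem.List.pyRange 0 n).foldl (fun inversions row =>
    (PySem.List.pyRange 0 n).foldl (fun inversions col =>
      let currVal := PySem.List.pyGetD (PySem.List.pyGetD matrix row []) col 0
      (PySem.List.pyRange row n).foldl (fun inversions i =>
        (PySem.List.pyRange col n).foldl (fun inversions j =>
          if currVal > PySem.List.pyGetD (PySem.List.pyGetD matrix i []) j 0 then
            inversions + 1
          else inversions) inversions) inversions) inversions) 0

-- ===== PORT B =====
-- Source B's hand-written `_bisect_right` is the same lo/hi/mid binary-search loop as the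
-- prelude primitive PySem.List.bisectRight, which serves as its port; the body of Source B's
-- innermost loop is the helper pvStep.
def pvStep (rowa rowb : List Int) (st : List Int × Int) (j : Int) : List Int × Int :=
  let v := PySem.List.pyGetD rowa j 0
  let s := PySem.List.insert st.1 ((PySem.List.bisectRight st.1 v : Nat) : Int) v
  (s, st.2 + ((s.length : Int) - (PySem.List.bisectRight s (PySem.List.pyGetD rowb j 0) : Nat)))

def inversionCounter_alt (matrix : List (List Int)) : Int :=
  let n : Int := (matrix.length : Int)
  (PySem.List.pyRange 0 n).foldl (fun total r =>
    let rowa := PySem.List.pyGetD matrix r []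
    (PySem.List.pyRange r n).foldl (fun total i =>
      let rowb := PySem.List.pyGetD matrix i []
      ((PySem.List.pyRange 0 n).foldl (pvStep rowa rowb) ([], total)).2) total) 0

-- ===== PRECONDITION & SPEC =====
-- Pre_ excludes exactly the inputs on which the Python A raises IndexError: A reads
-- matrix[r][c] for all r, c < len(matrix), so every row must have at least len(matrix) entries
-- (B reads the same cells and raises on the same inputs).
def Pre_inversionCounter (matrix : List (List Int)) : Prop :=
  ∀ row ∈ matrix, matrix.length ≤ row.length
instance (matrix : List (List Int)) : Decidable (Pre_inversionCounter matrix) := by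
  unfold Pre_inversionCounter; infer_instance

def pvWitness_inversionCounter : List (List Int) := [[1, 0], [2, 3]]

def Spec_inversionCounter (matrix : List (List Int)) (out : Int) : Prop := out = inversionCounter_alt matrix
instance (matrix : List (List Int)) (out : Int) : Decidable (Spec_inversionCounter matrix out) := by unfold Spec_inversionCounter; infer_instance

-- ===== CLAIM (what is proved, stated in full; the proofs are below) =====
def Claim_equal_inversionCounter : Prop := ∀ (matrix : List (List Int)), Dom_inversionCounter matrix → Pre_inversionCounter matrix → Spec_inversionCounter matrix (inversionCounter matrix)

-- ===== LEMMAS AND PROOFS =====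

-- the count added by Source B's inner loop at column j, for the row pair (ra, rb)
def pvCnt (ra rb : List Int) (j : ℕ) : Int :=
  (((List.range (j+1)).map (fun c => ra.getD c 0)).countP (fun a => decide (rb.getD j 0 < a)) : Int)

theorem pvRange_sum_aux (k a : ℕ) (f : Int → Int) :
    ((PySem.List.pyRange (a : Int) ((a + k : ℕ) : Int)).map f).sum = ∑ x ∈ Finset.Ico a (a + k), f (x : Int) := by
  induction k with
  | zero => simp [PySem.List.pyRange_one_eq_nil]
  | succ k ih =>
      have h1 : ((a + (k+1) : ℕ) : Int) = ((a + k : ℕ) : Int) + 1 := by push_cast; ring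
      rw [h1, PySem.List.pyRange_one_succ_right (by exact_mod_cast Nat.le_add_right a k),
        List.map_append, List.sum_append, ih]
      rw [show a + (k+1) = (a+k) + 1 from rfl, Finset.sum_Ico_succ_top (Nat.le_add_right a k)]
      simp

theorem pvRange_sum (a b : ℕ) (h : a ≤ b) (f : Int → Int) :
    ((PySem.List.pyRange (a : Int) (b : Int)).map f).sum = ∑ x ∈ Finset.Ico a b, f (x : Int) := by
  obtain ⟨k, rfl⟩ := Nat.exists_eq_add_of_le h
  exact pvRange_sum_aux k a f

theorem pvRange_sum0 (b : ℕ) (f : Int → Int) :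
    ((PySem.List.pyRange 0 (b : Int)).map f).sum = ∑ x ∈ Finset.range b, f (x : Int) := by
  have := pvRange_sum 0 b (Nat.zero_le _) f
  simpa using this

theorem pv_count_gt (s : List Int) (b : Int) (hs : s.Pairwise (· ≤ ·)) :
    ((s.length : Int) - (PySem.List.bisectRight s b : Nat)) =
      (s.countP (fun a => decide (b < a)) : Int) := by
  obtain ⟨hle, hlo, hhi⟩ := PySem.List.bisectRight_spec s b hs
  set k := PySem.List.bisectRight s b with hk
  have hsplit : s = s.take k ++ s.drop k := (List.take_append_drop k s).symm
  have hcount : s.countP (fun a => decide (b < a)) = s.length - k := by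
    conv_lhs => rw [hsplit]
    rw [List.countP_append]
    have h1 : (s.take k).countP (fun a => decide (b < a)) = 0 := by
      rw [List.countP_eq_zero]
      intro a ha
      obtain ⟨i, hi, rfl⟩ := List.mem_iff_getElem.mp ha
      have hik : i < k := by
        have := hi; rw [List.length_take] at this; omega
      have hilen : i < s.length := by
        have := hi; rw [List.length_take] at this; omega
      rw [List.getElem_take]
      simpa using not_lt.mpr (hlo i hilen hik)
    have h2 : (s.drop k).countP (fun a => decide (b < a)) = (s.drop k).length := by
      rw [List.countP_eq_length]
      intro a ha
      obtain ⟨i, hi, rfl⟩ := List.mem_iff_getElem.mp ha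
      rw [List.getElem_drop]
      have hilen : k + i < s.length := by
        have := hi; rw [List.length_drop] at this; omega
      simpa using hhi (k + i) hilen (Nat.le_add_right k i)
    rw [h1, h2, List.length_drop]
    omega
  rw [hcount]
  omega

theorem pv_insert_sorted (s : List Int) (v : Int) (hs : s.Pairwise (· ≤ ·)) :
    (PySem.List.insert s ((PySem.List.bisectRight s v : Nat) : Int) v).Pairwise (· ≤ ·) ∧
    (PySem.List.insert s ((PySem.List.bisectRight s v : Nat) : Int) v).Perm (v :: s) := by
  obtain ⟨hle, hlo, hhi⟩ := PySem.List.bisectRight_spec s v hs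
  set k := PySem.List.bisectRight s v with hk
  rw [PySem.List.insert_natCast s k v hle]
  constructor
  · rw [List.pairwise_append]
    refine ⟨hs.sublist (List.take_sublist k s), ?_, ?_⟩
    · rw [List.pairwise_cons]
      refine ⟨?_, hs.sublist (List.drop_sublist k s)⟩
      intro a ha
      obtain ⟨i, hi, rfl⟩ := List.mem_iff_getElem.mp ha
      rw [List.getElem_drop]
      have hilen : k + i < s.length := by
        have := hi; rw [List.length_drop] at this; omega
      exact le_of_lt (hhi (k + i) hilen (Nat.le_add_right k i))
    · intro a ha c hc
      obtain ⟨i, hi, rfl⟩ := List.mem_iff_getElem.mp ha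
      have hik : i < k := by have := hi; rw [List.length_take] at this; omega
      have hilen : i < s.length := by have := hi; rw [List.length_take] at this; omega
      rw [List.getElem_take]
      have hav : s[i] ≤ v := hlo i hilen hik
      rcases List.mem_cons.mp hc with rfl | hc
      · exact hav
      · obtain ⟨i2, hi2, rfl⟩ := List.mem_iff_getElem.mp hc
        rw [List.getElem_drop]
        have hilen2 : k + i2 < s.length := by
          have := hi2; rw [List.length_drop] at this; omega
        exact le_of_lt (lt_of_le_of_lt hav (hhi (k + i2) hilen2 (Nat.le_add_right k i2)))
  · have := List.perm_middle (a := v) (l₁ := s.take k) (l₂ := s.drop k)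
    simpa [List.take_append_drop] using this

theorem pvInner (ra rb : List Int) (k : ℕ) (t : Int) :
    ∃ s', (PySem.List.pyRange 0 (k : Int)).foldl (pvStep ra rb) ([], t) =
        (s', t + ∑ j ∈ Finset.range k, pvCnt ra rb j)
      ∧ s'.Pairwise (· ≤ ·) ∧ s'.Perm ((List.range k).map (fun c => ra.getD c 0)) := by
  induction k with
  | zero =>
      refine ⟨[], ?_, List.Pairwise.nil, by simp⟩
      simp [PySem.List.pyRange_one_eq_nil]
  | succ k ih =>
      obtain ⟨s', hfold, hsort, hperm⟩ := ih
      have hcast : ((k + 1 : ℕ) : Int) = (k : Int) + 1 := by push_cast; ring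
      rw [hcast, PySem.List.pyRange_one_succ_right (by positivity), List.foldl_append, hfold]
      set v := ra.getD k 0 with hv
      have hget : PySem.List.pyGetD ra (k : Int) 0 = v := PySem.List.pyGetD_natCast ra k 0
      have hgetb : PySem.List.pyGetD rb (k : Int) 0 = rb.getD k 0 := PySem.List.pyGetD_natCast rb k 0
      obtain ⟨hsort', hperm'⟩ := pv_insert_sorted s' v hsort
      set s'' := PySem.List.insert s' ((PySem.List.bisectRight s' v : Nat) : Int) v with hs''
      have hperm'' : s''.Perm ((List.range (k+1)).map (fun c => ra.getD c 0)) := by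
        rw [List.range_succ, List.map_append]
        refine (hperm'.trans (hperm.cons v)).trans ?_
        simpa using (List.perm_middle (a := v) (l₁ := (List.range k).map (fun c => ra.getD c 0)) (l₂ := [])).symm
      refine ⟨s'', ?_, hsort', hperm''⟩
      simp only [List.foldl_cons, List.foldl_nil, pvStep, hget, hgetb, ← hs'']
      refine Prod.ext rfl ?_
      simp only
      rw [pv_count_gt s'' (rb.getD k 0) hsort', hperm''.countP_eq, Finset.sum_range_succ, pvCnt]
      ring


theorem thmB_inner (ra rb : List Int) (n : ℕ) (t : Int) :
    ((PySem.List.pyRange 0 (n : Int)).foldl (pvStep ra rb) ([], t)).2 =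
      t + ∑ j ∈ Finset.range n, pvCnt ra rb j := by
  obtain ⟨s', h, -, -⟩ := pvInner ra rb n t
  rw [h]

theorem thmB_mid (m : List (List Int)) (ra : List Int) (r n : ℕ) (hrn : r ≤ n) (t : Int) :
    (PySem.List.pyRange (r : Int) (n : Int)).foldl
      (fun total i =>
        ((PySem.List.pyRange 0 (n : Int)).foldl (pvStep ra (PySem.List.pyGetD m i [])) ([], total)).2) t
    = t + ∑ i ∈ Finset.Ico r n, ∑ j ∈ Finset.range n, pvCnt ra (m.getD i []) j := by
  refine (PySem.List.foldl_congr_mem _ _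
    (fun total i => total + ∑ j ∈ Finset.range n, pvCnt ra (PySem.List.pyGetD m i []) j) t
    (fun acc x _ => thmB_inner ra (PySem.List.pyGetD m x []) n acc)).trans ?_
  rw [PySem.List.foldl_add, pvRange_sum r n hrn]
  congr 1
  exact Finset.sum_congr rfl fun x _ => by rw [PySem.List.pyGetD_natCast]

theorem thmB (m : List (List Int)) :
    inversionCounter_alt m =
      ∑ r ∈ Finset.range m.length, ∑ i ∈ Finset.Ico r m.length, ∑ j ∈ Finset.range m.length,
        pvCnt (m.getD r []) (m.getD i []) j := by
  show (PySem.List.pyRange 0 (m.length : Int)).foldl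
      (fun total r =>
        (PySem.List.pyRange r (m.length : Int)).foldl
          (fun total i =>
            ((PySem.List.pyRange 0 (m.length : Int)).foldl
              (pvStep (PySem.List.pyGetD m r []) (PySem.List.pyGetD m i [])) ([], total)).2) total) 0
    = _
  refine (PySem.List.foldl_congr_mem _ _
    (fun total r => total + ∑ i ∈ Finset.Ico r.toNat m.length, ∑ j ∈ Finset.range m.length,
      pvCnt (PySem.List.pyGetD m r []) (m.getD i []) j) 0
    (fun acc x hx => by
      obtain ⟨hx0, hxn⟩ := PySem.List.mem_pyRange_one.mp hx
      have hxeq : ((x.toNat : ℕ) : Int) = x := Int.toNat_of_nonneg hx0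
      rw [← hxeq]
      exact thmB_mid m (PySem.List.pyGetD m ((x.toNat : ℕ) : Int) []) x.toNat m.length
        (by omega) acc)).trans ?_
  rw [PySem.List.foldl_add, pvRange_sum0 m.length, zero_add]
  exact Finset.sum_congr rfl fun x _ => by rw [PySem.List.pyGetD_natCast]; simp


theorem thmA_j (cv : Int) (rb : List Int) (c n : ℕ) (hcn : c ≤ n) (t : Int) :
    (PySem.List.pyRange (c : Int) (n : Int)).foldl
      (fun acc j => if cv > PySem.List.pyGetD rb j 0 then acc + 1 else acc) t
    = t + ∑ j ∈ Finset.Ico c n, (if cv > rb.getD j 0 then (1 : Int) else 0) := by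
  rw [PySem.List.foldl_ite_add_one (p := fun j => cv > PySem.List.pyGetD rb j 0)]
  congr 1
  rw [← PySem.List.sum_map_ite_one_zero' (p := fun j => cv > PySem.List.pyGetD rb j 0),
    pvRange_sum c n hcn]
  exact Finset.sum_congr rfl fun x _ => by rw [PySem.List.pyGetD_natCast]

theorem thmA_i (m : List (List Int)) (cv : Int) (r c n : ℕ) (hrn : r ≤ n) (hcn : c ≤ n) (t : Int) :
    (PySem.List.pyRange (r : Int) (n : Int)).foldl
      (fun acc i =>
        (PySem.List.pyRange (c : Int) (n : Int)).foldl
          (fun acc j => if cv > PySem.List.pyGetD (PySem.List.pyGetD m i []) j 0 then acc + 1 else acc) acc) t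
    = t + ∑ i ∈ Finset.Ico r n, ∑ j ∈ Finset.Ico c n, (if cv > (m.getD i []).getD j 0 then (1 : Int) else 0) := by
  refine (PySem.List.foldl_congr_mem _ _
    (fun acc i => acc + ∑ j ∈ Finset.Ico c n, (if cv > (PySem.List.pyGetD m i []).getD j 0 then (1 : Int) else 0)) t
    (fun acc x _ => thmA_j cv (PySem.List.pyGetD m x []) c n hcn acc)).trans ?_
  rw [PySem.List.foldl_add, pvRange_sum r n hrn]
  congr 1
  exact Finset.sum_congr rfl fun x _ => by rw [PySem.List.pyGetD_natCast]

theorem thmA_c (m : List (List Int)) (ra : List Int) (r n : ℕ) (hrn : r ≤ n) (t : Int) :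
    (PySem.List.pyRange 0 (n : Int)).foldl
      (fun acc col =>
        (PySem.List.pyRange (r : Int) (n : Int)).foldl
          (fun acc i =>
            (PySem.List.pyRange col (n : Int)).foldl
              (fun acc j =>
                if PySem.List.pyGetD ra col 0 > PySem.List.pyGetD (PySem.List.pyGetD m i []) j 0 then acc + 1
                else acc) acc) acc) t
    = t + ∑ c ∈ Finset.range n, ∑ i ∈ Finset.Ico r n, ∑ j ∈ Finset.Ico c n,
        (if ra.getD c 0 > (m.getD i []).getD j 0 then (1 : Int) else 0) := by
  refine (PySem.List.foldl_congr_mem _ _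
    (fun acc col => acc + ∑ i ∈ Finset.Ico r n, ∑ j ∈ Finset.Ico col.toNat n,
      (if PySem.List.pyGetD ra col 0 > (m.getD i []).getD j 0 then (1 : Int) else 0)) t
    (fun acc x hx => by
      obtain ⟨hx0, hxn⟩ := PySem.List.mem_pyRange_one.mp hx
      have hxeq : ((x.toNat : ℕ) : Int) = x := Int.toNat_of_nonneg hx0
      rw [← hxeq]
      exact thmA_i m (PySem.List.pyGetD ra ((x.toNat : ℕ) : Int) 0) r x.toNat n hrn
        (by omega) acc)).trans ?_
  rw [PySem.List.foldl_add, pvRange_sum0 n]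
  congr 1
  exact Finset.sum_congr rfl fun x _ => by rw [PySem.List.pyGetD_natCast]; simp

theorem thmA (m : List (List Int)) :
    inversionCounter m =
      ∑ r ∈ Finset.range m.length, ∑ c ∈ Finset.range m.length,
        ∑ i ∈ Finset.Ico r m.length, ∑ j ∈ Finset.Ico c m.length,
          (if (m.getD r []).getD c 0 > (m.getD i []).getD j 0 then (1 : Int) else 0) := by
  show (PySem.List.pyRange 0 (m.length : Int)).foldl
      (fun inversions row =>
        (PySem.List.pyRange 0 (m.length : Int)).foldl
          (fun inversions col =>
            (PySem.List.pyRange row (m.length : Int)).foldl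
              (fun inversions i =>
                (PySem.List.pyRange col (m.length : Int)).foldl
                  (fun inversions j =>
                    if PySem.List.pyGetD (PySem.List.pyGetD m row []) col 0 >
                        PySem.List.pyGetD (PySem.List.pyGetD m i []) j 0 then
                      inversions + 1
                    else inversions) inversions) inversions) inversions) 0
    = _
  refine (PySem.List.foldl_congr_mem _ _
    (fun acc row => acc + ∑ c ∈ Finset.range m.length, ∑ i ∈ Finset.Ico row.toNat m.length,
      ∑ j ∈ Finset.Ico c m.length,
        (if (PySem.List.pyGetD m row []).getD c 0 > (m.getD i []).getD j 0 then (1 : Int) else 0)) 0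
    (fun acc x hx => by
      obtain ⟨hx0, hxn⟩ := PySem.List.mem_pyRange_one.mp hx
      have hxeq : ((x.toNat : ℕ) : Int) = x := Int.toNat_of_nonneg hx0
      rw [← hxeq]
      exact thmA_c m (PySem.List.pyGetD m ((x.toNat : ℕ) : Int) []) x.toNat m.length
        (by omega) acc)).trans ?_
  rw [PySem.List.foldl_add, pvRange_sum0 m.length, zero_add]
  exact Finset.sum_congr rfl fun x _ => by rw [PySem.List.pyGetD_natCast]; simp

theorem pvCountRange (k : ℕ) (p : ℕ → Bool) :
    ((List.range k).countP p : Int) = ∑ x ∈ Finset.range k, (if p x then (1 : Int) else 0) := by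
  induction k with
  | zero => simp
  | succ k ih =>
      rw [List.range_succ, List.countP_append, Finset.sum_range_succ, ← ih]
      simp only [List.countP_cons, List.countP_nil]
      push_cast
      split_ifs <;> simp

theorem pvCnt_eq (ra rb : List Int) (j : ℕ) :
    pvCnt ra rb j = ∑ c ∈ Finset.range (j+1), (if rb.getD j 0 < ra.getD c 0 then (1 : Int) else 0) := by
  rw [pvCnt, List.countP_map, pvCountRange]
  exact Finset.sum_congr rfl fun c _ => by simp

theorem pvFinal (m : List (List Int)) : inversionCounter m = inversionCounter_alt m := by
  rw [thmA, thmB]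
  refine Finset.sum_congr rfl fun r _ => ?_
  rw [Finset.sum_comm]
  refine Finset.sum_congr rfl fun i _ => ?_
  have h := Finset.sum_Ico_Ico_comm 0 m.length
    (fun c j => if (m.getD r []).getD c 0 > (m.getD i []).getD j 0 then (1 : Int) else 0)
  rw [← Finset.range_eq_Ico] at h
  simp only [Finset.range_eq_Ico] at *
  rw [h]
  refine Finset.sum_congr rfl fun j _ => ?_
  rw [pvCnt_eq, Finset.range_eq_Ico]

-- ===== VERDICT (by name: the statement is the Claim_ definition above) =====
theorem inversionCounter_spec : Claim_equal_inversionCounter := by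
  intro matrix _ _
  unfold Spec_inversionCounter
  exact pvFinal matrix
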